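-- pv_equiv track=rewrite | github.com/AI-Huang/AirEvaluation | datasets/data_utils.py | label_edges
-- ===== SOURCE A (Python) =====
-- def label_edges(manual_points, time_indices, data):
--     """label_edges, 根据手动 label 的 manual_points 精准标记边缘点 edges
--     Inputs:
--         manual_points: list like variable containing edge points, time in Hour;
--         time_indices: time axis data, in Hour;
--         data: for example, df_pm25_level.
--     Return:
--     """
--     edge_indices, edge_t = [], []
--
--     #
--     for i in range(0, len(manual_points), 2):
--         _edge, count = 0, 0
--         for j, t in enumerate(time_indices):
--             if manual_points[i] <= t < manual_points[i+1]:
--                 if data[j] == 2: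
--                     _edge_indices, _edge_t = j, t
--                     if count == 0:
--                         edge_indices.append(_edge_indices)
--                         edge_t.append(_edge_t)
--                         count += 1
--             elif count == 1:
--                 edge_indices.append(_edge_indices)
--                 edge_t.append(_edge_t)
--                 break
--     return edge_indices, edge_t
-- ===== SOURCE B (Python) =====
-- def _advance(state, j, t, data):
--     """Advance one interval's state machine on time point (j, t).
--     state = (lo, hi, phase, fj, ft, lj, lt); phase 0 = no match yet,
--     1 = first match found / tracking last, 2 = left the interval (done)."""
--     lo, hi, phase, fj, ft, lj, lt = state
--     if phase == 0:
--         if lo <= t < hi and data[j] == 2: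
--             return (lo, hi, 1, j, t, j, t)
--     elif phase == 1:
--         if lo <= t < hi:
--             if data[j] == 2:
--                 return (lo, hi, 1, fj, ft, j, t)
--         else:
--             return (lo, hi, 2, fj, ft, lj, lt)
--     return state
--
--
-- def label_edges(manual_points, time_indices, data):
--     states = [(manual_points[i], manual_points[i + 1], 0, 0, 0, 0, 0)
--               for i in range(0, len(manual_points) - 1, 2)]
--     # single pass over the time axis, advancing every interval's state machine
--     for j, t in enumerate(time_indices):
--         states = [_advance(st, j, t, data) for st in states]
--     edge_indices, edge_t = [], []
--     for _lo, _hi, phase, fj, ft, lj, lt in states: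
--         if phase >= 1:
--             edge_indices.append(fj)
--             edge_t.append(ft)
--         if phase == 2:
--             edge_indices.append(lj)
--             edge_t.append(lt)
--     return edge_indices, edge_t
-- ===== Notes on version B (the rewrite author's own statement) =====
-- stated objective: alternative
-- what changed: B interchanges the loops: instead of re-scanning the whole time axis once per manual-point interval with a count flag and break, it makes a single pass over the time axis advancing one small per-interval state machine (phase/first/last), then emits each interval's first and last data==2 point.
-- outside the precondition, e.g. on label_edges([0, 10], [0, 20, 5], [2]): A returns ([0, 0], [0, 0]), B returns ([0, 0], [0, 0])
import Mathlib
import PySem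

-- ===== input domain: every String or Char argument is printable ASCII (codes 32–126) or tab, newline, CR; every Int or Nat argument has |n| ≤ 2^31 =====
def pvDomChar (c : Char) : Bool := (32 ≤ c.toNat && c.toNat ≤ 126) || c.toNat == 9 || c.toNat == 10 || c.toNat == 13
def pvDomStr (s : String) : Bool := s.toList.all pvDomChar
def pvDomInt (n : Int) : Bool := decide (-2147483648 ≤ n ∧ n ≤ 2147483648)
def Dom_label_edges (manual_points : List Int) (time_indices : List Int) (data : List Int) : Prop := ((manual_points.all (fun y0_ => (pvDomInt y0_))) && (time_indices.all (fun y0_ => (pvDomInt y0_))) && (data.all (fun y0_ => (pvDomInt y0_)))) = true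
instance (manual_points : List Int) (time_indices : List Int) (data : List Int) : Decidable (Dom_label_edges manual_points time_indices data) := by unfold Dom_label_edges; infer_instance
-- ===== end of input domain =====

-- B replaces A's per-interval rescans of the time axis (with a count flag) by ONE pass over the
-- time axis that advances a small state machine per interval; return values agree on Pre_.

-- ===== PORT A =====
-- xs[i] where Python would raise IndexError is out of Pre_; default 0 there.
def pyGetI (xs : List Int) (i : Int) : Int := (PySem.List.pyGet? xs i).getD 0

-- A's inner 'for j, t in enumerate(time_indices)' loop with its break, state = (count, _edge_indices, _edge_t)
def labelLoopA (lo hi : Int) (data : List Int) :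
    List (Int × Int) → Nat → Int → Int → List Int → List Int → List Int × List Int
  | [], _, _, _, ei, et => (ei, et)
  | (j, t) :: rest, count, ej, ev, ei, et =>
    if lo ≤ t ∧ t < hi then
      if pyGetI data j = 2 then
        if count = 0 then
          labelLoopA lo hi data rest 1 j t (ei ++ [j]) (et ++ [t])
        else
          labelLoopA lo hi data rest count j t ei et
      else labelLoopA lo hi data rest count ej ev ei et
    else if count = 1 then (ei ++ [ej], et ++ [ev])
    else labelLoopA lo hi data rest count ej ev ei et

def label_edges (manual_points : List Int) (time_indices : List Int) (data : List Int) : List Int × List Int :=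
  (PySem.List.pyRange 0 (manual_points.length : Int) 2).foldl
    (fun acc i =>
      labelLoopA (pyGetI manual_points i) (pyGetI manual_points (i + 1)) data
        (PySem.List.enumerate time_indices) 0 0 0 acc.1 acc.2)
    ([], [])

-- ===== PORT B =====
-- _advance: one interval's state machine; state = (lo, hi, phase, fj, ft, lj, lt)
def advanceB (data : List Int) (j t : Int) (st : Int × Int × Nat × Int × Int × Int × Int) :
    Int × Int × Nat × Int × Int × Int × Int :=
  match st with
  | (lo, hi, phase, fj, ft, lj, lt) =>
    if phase = 0 then
      if (lo ≤ t ∧ t < hi) ∧ pyGetI data j = 2 then (lo, hi, 1, j, t, j, t) else st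
    else if phase = 1 then
      if lo ≤ t ∧ t < hi then
        if pyGetI data j = 2 then (lo, hi, 1, fj, ft, j, t) else st
      else (lo, hi, 2, fj, ft, lj, lt)
    else st

-- the final emission loop of Source B
def emitB (acc : List Int × List Int) (st : Int × Int × Nat × Int × Int × Int × Int) : List Int × List Int :=
  match st with
  | (_, _, phase, fj, ft, lj, lt) =>
    let acc1 := if 1 ≤ phase then (acc.1 ++ [fj], acc.2 ++ [ft]) else acc
    if phase = 2 then (acc1.1 ++ [lj], acc1.2 ++ [lt]) else acc1

def label_edges_alt (manual_points : List Int) (time_indices : List Int) (data : List Int) : List Int × List Int :=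
  ((PySem.List.enumerate time_indices).foldl
      (fun sts jt => sts.map (advanceB data jt.1 jt.2))
      ((PySem.List.pyRange 0 ((manual_points.length : Int) - 1) 2).map
        (fun i => (pyGetI manual_points i, pyGetI manual_points (i + 1), (0 : Nat), (0 : Int), (0 : Int), (0 : Int), (0 : Int))))).foldl
    emitB ([], [])

-- ===== PRECONDITION & SPEC =====
-- Python A raises IndexError when manual_points has odd length and the scan reaches some t ≥ its
-- last point (first conjunct: exact), or when data is shorter than time_indices and the scan
-- reaches an in-interval time point with index ≥ len(data).  The second conjunct excludes every
-- in-interval index ≥ len(data), a slight over-approximation: it also excludes some inputs on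
-- which A still returns because an earlier break stops the scan before the out-of-range access
-- (B returns the same value there anyway; see claim cites).
def Pre_label_edges (manual_points : List Int) (time_indices : List Int) (data : List Int) : Prop :=
  (manual_points.length % 2 = 0 ∨ ∀ t ∈ time_indices, t < manual_points.getLastD 0) ∧
  (∀ p ∈ PySem.List.enumerate time_indices,
    p.1 < (data.length : Int) ∨
    ∀ i ∈ PySem.List.pyRange 0 ((manual_points.length : Int) - ((manual_points.length % 2 : Nat) : Int)) 2,
      ¬(pyGetI manual_points i ≤ p.2 ∧ p.2 < pyGetI manual_points (i + 1)))
instance (manual_points : List Int) (time_indices : List Int) (data : List Int) : Decidable (Pre_label_edges manual_points time_indices data) := by unfold Pre_label_edges; infer_instance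

def pvWitness_label_edges : List Int × List Int × List Int := ([0, 10], [1, 2, 3], [2, 0, 2])

def Spec_label_edges (manual_points : List Int) (time_indices : List Int) (data : List Int) (out : List Int × List Int) : Prop := out = label_edges_alt manual_points time_indices data
instance (manual_points : List Int) (time_indices : List Int) (data : List Int) (out : List Int × List Int) : Decidable (Spec_label_edges manual_points time_indices data out) := by unfold Spec_label_edges; infer_instance

-- ===== CLAIM (what is proved, stated in full; the proofs are below) =====
def Claim_equal_label_edges : Prop := ∀ (manual_points : List Int) (time_indices : List Int) (data : List Int), Dom_label_edges manual_points time_indices data → Pre_label_edges manual_points time_indices data → Spec_label_edges manual_points time_indices data (label_edges manual_points time_indices data)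

-- ===== LEMMAS AND PROOFS =====

-- phase 2 is absorbing for advanceB
lemma foldl_advance_done (data : List Int) (js : List (Int × Int)) (lo hi fj ft lj lt : Int) :
    js.foldl (fun s jt => advanceB data jt.1 jt.2 s) (lo, hi, 2, fj, ft, lj, lt)
      = (lo, hi, 2, fj, ft, lj, lt) := by
  induction js with
  | nil => rfl
  | cons p rest ih => simpa [advanceB] using ih

-- phase-1 correspondence: A's loop with count = 1 versus folding advanceB from phase 1
lemma loopA_one_eq (data : List Int) (lo hi : Int) (js : List (Int × Int)) :
    ∀ (fj ft lj lt : Int) (A E : List Int),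
    labelLoopA lo hi data js 1 lj lt (A ++ [fj]) (E ++ [ft])
      = emitB (A, E) (js.foldl (fun s jt => advanceB data jt.1 jt.2 s) (lo, hi, 1, fj, ft, lj, lt)) := by
  induction js with
  | nil => intro fj ft lj lt A E; simp [labelLoopA, emitB]
  | cons p rest ih =>
    intro fj ft lj lt A E
    obtain ⟨j, t⟩ := p
    by_cases h1 : lo ≤ t ∧ t < hi
    · by_cases h2 : pyGetI data j = 2
      · simpa [labelLoopA, advanceB, h1, h2] using ih fj ft j t A E
      · simpa [labelLoopA, advanceB, h1, h2] using ih fj ft lj lt A E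
    · have h2 : advanceB data j t (lo, hi, 1, fj, ft, lj, lt) = (lo, hi, 2, fj, ft, lj, lt) := by
        simp [advanceB, h1]
      simp only [List.foldl_cons]
      rw [h2, foldl_advance_done]
      simp [labelLoopA, h1, emitB, List.append_assoc]

-- phase-0 correspondence: A's loop with count = 0 versus folding advanceB from phase 0
lemma loopA_zero_eq (data : List Int) (lo hi : Int) (js : List (Int × Int)) :
    ∀ (ej ev : Int) (A E : List Int),
    labelLoopA lo hi data js 0 ej ev A E
      = emitB (A, E) (js.foldl (fun s jt => advanceB data jt.1 jt.2 s) (lo, hi, 0, 0, 0, 0, 0)) := by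
  induction js with
  | nil => intro ej ev A E; simp [labelLoopA, emitB]
  | cons p rest ih =>
    intro ej ev A E
    obtain ⟨j, t⟩ := p
    by_cases h1 : lo ≤ t ∧ t < hi
    · by_cases h2 : pyGetI data j = 2
      · simpa [labelLoopA, advanceB, h1, h2] using loopA_one_eq data lo hi rest j t j t A E
      · simpa [labelLoopA, advanceB, h1, h2] using ih ej ev A E
    · simpa [labelLoopA, advanceB, h1] using ih ej ev A E

-- an interval no time point ever enters contributes nothing in A
lemma loopA_empty_interval (data : List Int) (lo hi : Int) (js : List (Int × Int))
    (h : ∀ p ∈ js, ¬ lo ≤ p.2) :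
    ∀ (ej ev : Int) (A E : List Int), labelLoopA lo hi data js 0 ej ev A E = (A, E) := by
  induction js with
  | nil => intro ej ev A E; rfl
  | cons p rest ih =>
    intro ej ev A E
    obtain ⟨j, t⟩ := p
    have ht : ¬ lo ≤ t := h (j, t) (by simp)
    have h1 : ¬ (lo ≤ t ∧ t < hi) := fun hc => ht hc.1
    simpa [labelLoopA, h1] using ih (fun q hq => h q (by simp [hq])) ej ev A E

-- loop interchange: folding a map-step over js = mapping the per-state fold
lemma foldl_map_states (data : List Int) (js : List (Int × Int)) :
    ∀ (S : List (Int × Int × Nat × Int × Int × Int × Int)),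
    js.foldl (fun sts jt => sts.map (advanceB data jt.1 jt.2)) S
      = S.map (fun s => js.foldl (fun s jt => advanceB data jt.1 jt.2 s) s) := by
  induction js with
  | nil => intro S; simp [List.foldl_nil]
  | cons p rest ih =>
    intro S
    simp only [List.foldl_cons, ih, List.map_map]
    rfl

-- range(0, n, 2) versus range(0, n-1, 2)
lemma pyRange_two_even (n : Nat) (h : n % 2 = 0) :
    PySem.List.pyRange 0 (n : Int) 2 = PySem.List.pyRange 0 ((n : Int) - 1) 2 := by
  rw [PySem.List.pyRange_of_pos _ _ (by norm_num), PySem.List.pyRange_of_pos _ _ (by norm_num)]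
  rcases Nat.eq_zero_or_pos n with h0 | h0
  · subst h0; norm_num
  · have e1 : ((n : Int) - 0 + 2 - 1) / 2 = (((n + 1) / 2 : Nat) : Int) := by omega
    have e2 : ((n : Int) - 1 - 0 + 2 - 1) / 2 = (((n / 2 : Nat)) : Int) := by omega
    rw [if_pos (by exact_mod_cast h0), if_pos (by omega), e1, e2,
      Int.toNat_natCast, Int.toNat_natCast]
    congr 2
    omega

lemma pyRange_two_odd (n : Nat) (h : n % 2 = 1) :
    PySem.List.pyRange 0 (n : Int) 2
      = PySem.List.pyRange 0 ((n : Int) - 1) 2 ++ [(n : Int) - 1] := by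
  rw [PySem.List.pyRange_of_pos _ _ (by norm_num), PySem.List.pyRange_of_pos _ _ (by norm_num)]
  have h1 : 1 ≤ n := by omega
  have e1 : ((n : Int) - 0 + 2 - 1) / 2 = (((n + 1) / 2 : Nat) : Int) := by omega
  rcases Nat.eq_or_lt_of_le h1 with h1' | h1'
  · subst h1'
    decide
  · have e2 : ((n : Int) - 1 - 0 + 2 - 1) / 2 = (((n / 2 : Nat)) : Int) := by omega
    rw [if_pos (by exact_mod_cast h1), if_pos (by omega), e1, e2,
      Int.toNat_natCast, Int.toNat_natCast]
    have hsucc : (n + 1) / 2 = n / 2 + 1 := by omega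
    rw [hsucc, List.range_succ, List.map_append]
    congr 1
    simp only [List.map_cons, List.map_nil]
    congr 1
    omega

-- the snd of an enumerate entry is an element of the list
lemma snd_mem_of_mem_enumerate {α : Type} (xs : List α) (p : Int × α)
    (hp : p ∈ PySem.List.enumerate xs 0) : p.2 ∈ xs := by
  rw [PySem.List.mem_enumerate_iff] at hp
  obtain ⟨k, hk, rfl⟩ := hp
  exact List.getElem_mem hk

-- pyGetI at the last index is getLastD
lemma pyGetI_last (mp : List Int) (h : mp ≠ []) :
    pyGetI mp ((mp.length : Int) - 1) = mp.getLastD 0 := by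
  have hlen : 1 ≤ mp.length := List.length_pos_iff.mpr h
  have hcast : (mp.length : Int) - 1 = ((mp.length - 1 : Nat) : Int) := by omega
  rw [pyGetI, hcast, PySem.List.pyGet?_natCast, ← List.getLast?_eq_getElem?,
    List.getLastD_eq_getLast?]

-- pointwise-equal step functions fold alike
lemma foldl_fun_ext {α β : Type} (f g : β → α → β) (init : β) (l : List α)
    (h : ∀ b a, f b a = g b a) : l.foldl f init = l.foldl g init := by
  induction l generalizing init with
  | nil => rfl
  | cons x xs ih => rw [List.foldl_cons, List.foldl_cons, h, ih]

-- the two folds agree interval by interval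
lemma folds_agree (mp ti data : List Int) :
    (PySem.List.pyRange 0 ((mp.length : Int) - 1) 2).foldl
      (fun acc i =>
        labelLoopA (pyGetI mp i) (pyGetI mp (i + 1)) data
          (PySem.List.enumerate ti) 0 0 0 acc.1 acc.2)
      ([], [])
    = label_edges_alt mp ti data := by
  unfold label_edges_alt
  rw [foldl_map_states, List.map_map, List.foldl_map]
  apply foldl_fun_ext
  intro acc i
  rw [loopA_zero_eq]
  rfl

theorem label_edges_spec_aux (mp ti data : List Int)
    (hpre : Pre_label_edges mp ti data) :
    label_edges mp ti data = label_edges_alt mp ti data := by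
  unfold label_edges
  rcases Nat.even_or_odd mp.length with he | ho
  · rw [pyRange_two_even mp.length (Nat.even_iff.mp he)]
    exact folds_agree mp ti data
  · have ho' := Nat.odd_iff.mp ho
    rw [pyRange_two_odd mp.length ho', List.foldl_append]
    have hne : mp ≠ [] := by
      intro hnil; rw [hnil] at ho'; simp at ho'
    have hlast : ∀ t ∈ ti, t < mp.getLastD 0 := by
      rcases hpre.1 with h | h
      · omega
      · exact h
    have hempty : ∀ p ∈ PySem.List.enumerate ti 0, ¬ pyGetI mp ((mp.length : Int) - 1) ≤ p.2 := by
      intro p hp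
      rw [pyGetI_last mp hne]
      have := hlast p.2 (snd_mem_of_mem_enumerate ti p hp)
      omega
    simp only [List.foldl_cons, List.foldl_nil]
    rw [loopA_empty_interval data _ _ _ hempty]
    exact folds_agree mp ti data

-- ===== VERDICT (by name: the statement is the Claim_ definition above) =====
theorem label_edges_spec : Claim_equal_label_edges := by
  intro mp ti data _ hpre
  unfold Spec_label_edges
  exact label_edges_spec_aux mp ti data hpre
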